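-- pv_equiv track=rewrite | github.com/wangpeibao/leetcode-python | normal/normal5413.py | arrangeWords
-- ===== SOURCE A (Python) =====
-- def arrangeWords(text: str) -> str:  # 冒泡排序
--     tlist = text.split(" ")
--     tlist[0] = tlist[0].lower()
--     sort_list = []
--     for val in tlist:
--         sort_list.append([val, len(val)])
--     sort_list.sort(key=lambda x: x[1])
--     result = ""
--     for sl in sort_list:
--         if not result:
--             result += sl[0].title()
--         else:
--             result += " " + sl[0]
--     return result
-- ===== SOURCE B (Python) =====
-- def arrangeWords(text: str) -> str:
--     words = text.split(" ")
--     words[0] = words[0].lower()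
--     words = [w for w in words if w]
--     if not words:
--         return ""
--     maxlen = max(map(len, words))
--     ordered = []
--     for length in range(1, maxlen + 1):
--         for w in words:
--             if len(w) == length:
--                 ordered.append(w)
--     return " ".join([ordered[0].title()] + ordered[1:])
-- ===== Notes on version B (the rewrite author's own statement) =====
-- stated objective: alternative
-- what changed: B replaces A's decorate-with-length comparison sort by a stable bucket pass (for each length 1..maxlen collect the words of that length, in order), drops empty tokens up front instead of letting the output loop skip them, and emits the result with a single space-join instead of A's conditional accumulator.
import Mathlib
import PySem

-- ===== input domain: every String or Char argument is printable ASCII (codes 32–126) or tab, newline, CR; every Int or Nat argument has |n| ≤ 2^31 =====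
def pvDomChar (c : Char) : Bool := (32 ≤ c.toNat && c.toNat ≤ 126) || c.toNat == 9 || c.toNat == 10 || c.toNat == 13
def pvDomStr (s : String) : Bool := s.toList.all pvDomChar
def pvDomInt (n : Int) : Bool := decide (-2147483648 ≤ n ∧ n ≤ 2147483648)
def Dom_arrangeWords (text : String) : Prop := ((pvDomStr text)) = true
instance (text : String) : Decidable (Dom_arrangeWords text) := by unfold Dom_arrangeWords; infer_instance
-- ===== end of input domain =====

-- B replaces A's comparison sort by a stable length-bucket pass (words of each length collected
-- in increasing length order) over the non-empty words, joined directly; objective: alternative.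


-- ===== PORT A =====
-- hand-written port of Python's str.title(), exact on the ASCII domain:
-- a letter is uppercased after a non-letter (or at the start) and lowercased after a letter
def titleStep (st : List Char × Bool) (c : Char) : List Char × Bool :=
  (st.1 ++ [if PySem.Chars.isalpha c then
              (if st.2 then PySem.Chars.lowerChar c else PySem.Chars.upperChar c)
            else c],
   PySem.Chars.isalpha c)

def pyTitle (s : List Char) : List Char :=
  (s.foldl titleStep (([] : List Char), false)).1

def arrangeWordsCore (t : List Char) : List Char :=
  let tlist := PySem.Chars.splitOn t [' ']
  let tlist := match tlist with
    | [] => []                                  -- unreachable: split(" ") never yields an empty list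
    | h :: r => PySem.Chars.lower h :: r        -- tlist[0] = tlist[0].lower()
  let sortList := tlist.foldl (fun acc v => acc ++ [(v, PySem.Chars.len v)]) []
  let sortedL := PySem.List.sorted sortList (fun x => x.2)
  sortedL.foldl (fun result sl =>
    if result = [] then result ++ pyTitle sl.1 else result ++ ([' '] ++ sl.1)) []

def arrangeWords (text : String) : String := String.mk (arrangeWordsCore text.toList)

-- ===== PORT B =====
def arrangeWordsAltCore (t : List Char) : List Char :=
  let words := PySem.Chars.splitOn t [' ']
  let words := match words with
    | [] => []                                  -- unreachable: split(" ") never yields an empty list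
    | h :: r => PySem.Chars.lower h :: r        -- words[0] = words[0].lower()
  let words := words.filter (fun w => !w.isEmpty)
  match words with
  | [] => []
  | w :: ws =>
    -- max(map(len, words)) of the non-empty list, as the running max
    let maxlen := ws.foldl (fun m v => max m (PySem.Chars.len v)) (PySem.Chars.len w)
    let ordered := (PySem.List.pyRange 1 (maxlen + 1) 1).foldl
      (fun acc l => (w :: ws).foldl
        (fun a v => if PySem.Chars.len v = l then a ++ [v] else a) acc) []
    match ordered with
    | [] => []                                  -- unreachable: w itself lies in bucket len(w)
    | o :: os => PySem.Chars.join [' '] (pyTitle o :: os)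

def arrangeWords_alt (text : String) : String := String.mk (arrangeWordsAltCore text.toList)

-- ===== PRECONDITION & SPEC =====
def Spec_arrangeWords (text : String) (out : String) : Prop := out = arrangeWords_alt text
instance (text : String) (out : String) : Decidable (Spec_arrangeWords text out) := by unfold Spec_arrangeWords; infer_instance

-- ===== CLAIM (what is proved, stated in full; the proofs are below) =====
def Claim_equal_arrangeWords : Prop := ∀ (text : String), Dom_arrangeWords text → Spec_arrangeWords text (arrangeWords text)

-- ===== LEMMAS AND PROOFS =====

theorem flatMap_congr' {α β : Type} {L : List α} {f g : α → List β}
    (h : ∀ l ∈ L, f l = g l) : L.flatMap f = L.flatMap g := by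
  induction L with
  | nil => rfl
  | cons a L ih =>
    simp only [List.flatMap_cons, h a (List.mem_cons_self ..),
      ih (fun l hl => h l (List.mem_cons_of_mem _ hl))]

-- inserting x into P ++ S places it exactly between them when nothing in P and everything in S is "after" x
theorem insertBy_middle {α : Type} (before : α → α → Bool) (x : α) :
    ∀ (P S : List α), (∀ p ∈ P, before x p = false) → (∀ s ∈ S, before x s = true) →
      PySem.List.insertBy before x (P ++ S) = P ++ x :: S := by
  intro P
  induction P with
  | nil =>
    intro S _ hS
    cases S with
    | nil => rfl
    | cons s t =>
      simp [PySem.List.insertBy, hS s (List.mem_cons_self ..)]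
  | cons p P ih =>
    intro S hP hS
    have hp : before x p = false := hP p (List.mem_cons_self ..)
    simp only [List.cons_append, PySem.List.insertBy, hp, Bool.false_eq_true, if_false,
      List.cons.injEq, true_and]
    exact ih S (fun q hq => hP q (List.mem_cons_of_mem _ hq)) hS

-- the stable sort by an Int key is the concatenation of the key buckets, in increasing key order
theorem sorted_eq_flatMap_filter {α : Type} (key : α → Int) :
    ∀ (xs : List α) (ls : List Int), ls.Pairwise (· < ·) → (∀ x ∈ xs, key x ∈ ls) →
      PySem.List.sorted xs key = ls.flatMap (fun l => xs.filter (fun x => decide (key x = l))) := by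
  intro xs
  induction xs using List.reverseRecOn with
  | nil => intro ls _ _; simp [PySem.List.sorted]
  | append_singleton ys x ih =>
    intro ls hpw hmem
    have hys : ∀ y ∈ ys, key y ∈ ls := fun y hy => hmem y (by simp [hy])
    have hx : key x ∈ ls := hmem x (by simp)
    obtain ⟨L1, L2, rfl⟩ := List.append_of_mem hx
    have hpw' := hpw
    rw [List.pairwise_append] at hpw'
    obtain ⟨_, h2, h12⟩ := hpw'
    rw [List.pairwise_cons] at h2
    obtain ⟨hlt2, _⟩ := h2
    have hlt1 : ∀ l ∈ L1, l < key x := fun l hl => h12 l hl (key x) (by simp)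
    have hsorted : PySem.List.sorted (ys ++ [x]) key =
        PySem.List.insertBy (fun a b => decide (key a < key b)) x (PySem.List.sorted ys key) := by
      rw [PySem.List.sorted_eq_foldl_insertBy, PySem.List.sorted_eq_foldl_insertBy,
        List.foldl_append]
      rfl
    have hsortys := ih (L1 ++ key x :: L2) hpw hys
    set g := fun l => ys.filter (fun y => decide (key y = l)) with hg
    have hstep : PySem.List.insertBy (fun a b => decide (key a < key b)) x
        ((L1.flatMap g ++ g (key x)) ++ L2.flatMap g)
        = (L1.flatMap g ++ g (key x)) ++ x :: L2.flatMap g := by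
      apply insertBy_middle
      · intro p hp
        simp only [List.mem_append, List.mem_flatMap, hg, List.mem_filter,
          decide_eq_true_eq] at hp
        simp only [decide_eq_false_iff_not]
        rcases hp with ⟨l, hl, _, hkey⟩ | ⟨_, hkey⟩
        · have := hlt1 l hl; omega
        · omega
      · intro s hs
        simp only [List.mem_flatMap, hg, List.mem_filter, decide_eq_true_eq] at hs
        obtain ⟨l, hl, _, hkey⟩ := hs
        have := hlt2 l hl
        simp only [decide_eq_true_eq]
        omega
    have hbucket1 : ∀ L : List Int, (∀ l ∈ L, l ≠ key x) →
        L.flatMap (fun l => (ys ++ [x]).filter (fun y => decide (key y = l))) = L.flatMap g := by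
      intro L hL
      apply flatMap_congr'
      intro l hl
      simp only [List.filter_append, hg, List.filter_cons, List.filter_nil]
      have : (decide (key x = l)) = false := by
        simp only [decide_eq_false_iff_not]
        exact fun h => hL l hl (h ▸ rfl)
      simp [this]
    have hbucketx : (ys ++ [x]).filter (fun y => decide (key y = key x)) = g (key x) ++ [x] := by
      simp [hg, List.filter_append]
    rw [hsorted, hsortys]
    simp only [List.flatMap_append, List.flatMap_cons, ← List.append_assoc]
    rw [hstep, hbucket1 L1 (fun l hl => by have := hlt1 l hl; omega),
      hbucket1 L2 (fun l hl => by have := hlt2 l hl; omega), hbucketx]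
    simp

-- building the (word, len) pairs by appending is mapping
theorem foldl_build_pairs (xs : List (List Char)) (acc : List (List Char × Int)) :
    xs.foldl (fun acc v => acc ++ [(v, PySem.Chars.len v)]) acc
      = acc ++ xs.map (fun v => (v, PySem.Chars.len v)) := by
  induction xs generalizing acc with
  | nil => simp
  | cons v xs ih => rw [List.foldl_cons, ih]; simp

-- the title fold only ever appends to its accumulator
theorem foldl_titleStep_acc (s : List Char) : ∀ (acc : List Char) (b : Bool),
    (s.foldl titleStep (acc, b)).1 = acc ++ (s.foldl titleStep ([], b)).1 := by
  induction s with
  | nil => intro acc b; simp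
  | cons c s ih =>
    intro acc b
    simp only [List.foldl_cons, titleStep, List.nil_append]
    rw [ih, ih [_]]
    simp

theorem pyTitle_ne_nil (s : List Char) (h : s ≠ []) : pyTitle s ≠ [] := by
  cases s with
  | nil => exact absurd rfl h
  | cons c cs =>
    simp only [pyTitle, List.foldl_cons, titleStep, List.nil_append]
    rw [foldl_titleStep_acc]
    simp

-- A's output loop: leading empty words leave the empty accumulator unchanged
theorem foldl_out_empties (E : List (List Char × Int)) (h : ∀ e ∈ E, e.1 = []) :
    E.foldl (fun result sl =>
      if result = [] then result ++ pyTitle sl.1 else result ++ ([' '] ++ sl.1)) [] = ([] : List Char) := by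
  induction E with
  | nil => rfl
  | cons e E ih =>
    have he : e.1 = [] := h e (List.mem_cons_self ..)
    rw [List.foldl_cons]
    have hstep : (if ([] : List Char) = [] then [] ++ pyTitle e.1 else [] ++ ([' '] ++ e.1)) = [] := by
      rw [if_pos rfl, he]; rfl
    rw [hstep]
    exact ih (fun x hx => h x (List.mem_cons_of_mem _ hx))

-- A's output loop after the first word: separator-prepended concatenation
theorem foldl_out_sep (os : List (List Char)) : ∀ (r : List Char), r ≠ [] →
    os.foldl (fun result v =>
      if result = [] then result ++ pyTitle v else result ++ ([' '] ++ v)) r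
      = r ++ os.flatMap (fun v => ' ' :: v) := by
  induction os with
  | nil => intro r _; simp
  | cons v os ih =>
    intro r hr
    simp only [List.foldl_cons, if_neg hr, List.flatMap_cons]
    rw [ih (r ++ ([' '] ++ v)) (by simp)]
    simp

-- ' '.join of a nonempty list is the separator-prepended concatenation
theorem join_space_cons (x : List Char) (os : List (List Char)) :
    PySem.Chars.join [' '] (x :: os) = x ++ os.flatMap (fun v => ' ' :: v) := by
  induction os generalizing x with
  | nil => simp [PySem.Chars.join, List.intercalate]
  | cons v os ih =>
    rw [PySem.Chars.join_cons_cons, List.flatMap_cons, ih v]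
    simp

-- B's inner loop collects one bucket: the words of length l, in order
theorem bucket_foldl (l : Int) :
    ∀ (xs : List (List Char)) (acc : List (List Char)),
      xs.foldl (fun a v => if PySem.Chars.len v = l then a ++ [v] else a) acc
        = acc ++ xs.filter (fun v => decide (PySem.Chars.len v = l)) := by
  intro xs
  induction xs with
  | nil => intro acc; simp
  | cons v xs ih =>
    intro acc
    rw [List.foldl_cons, ih, List.filter_cons]
    by_cases h : PySem.Chars.len v = l
    · simp only [PySem.Chars.len_eq] at h
      simp [h]
    · simp only [PySem.Chars.len_eq] at h
      simp [h]

-- the common tail of both ports, stated on the (already lowered) word list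
theorem main_eq (ws : List (List Char)) :
    (PySem.List.sorted (ws.foldl (fun acc v => acc ++ [(v, PySem.Chars.len v)]) []) (fun x => x.2)).foldl
      (fun result sl => if result = [] then result ++ pyTitle sl.1 else result ++ ([' '] ++ sl.1)) []
    = (match ws.filter (fun w => !w.isEmpty) with
      | [] => ([] : List Char)
      | w :: ws' =>
        let maxlen := ws'.foldl (fun m v => max m (PySem.Chars.len v)) (PySem.Chars.len w)
        match (PySem.List.pyRange 1 (maxlen + 1) 1).foldl
            (fun acc l => (w :: ws').foldl
              (fun a v => if PySem.Chars.len v = l then a ++ [v] else a) acc) [] with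
        | [] => []
        | o :: os => PySem.Chars.join [' '] (pyTitle o :: os)) := by
  rw [foldl_build_pairs]
  rw [List.nil_append]
  cases hN : ws.filter (fun w => !w.isEmpty) with
  | nil =>
    have hemp : ∀ v ∈ ws, v = [] := by
      intro v hv
      by_contra hne
      have hvf : v ∈ ws.filter (fun w => !w.isEmpty) :=
        List.mem_filter.mpr ⟨hv, by simpa using hne⟩
      rw [hN] at hvf
      exact absurd hvf (List.not_mem_nil)
    dsimp only
    apply foldl_out_empties
    intro e he
    have he' : e ∈ ws.map (fun v => (v, PySem.Chars.len v)) := (PySem.List.mem_sorted _ _ _ _).mp he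
    obtain ⟨v, hv, rfl⟩ := List.mem_map.mp he'
    exact hemp v hv
  | cons w ws' =>
    dsimp only
    set M := ws'.foldl (fun m v => max m (PySem.Chars.len v)) (PySem.Chars.len w) with hM
    have hmax := PySem.List.le_foldl_max_int ws' PySem.Chars.len (PySem.Chars.len w)
    have hlenN : ∀ v ∈ w :: ws', 1 ≤ PySem.Chars.len v ∧ PySem.Chars.len v ≤ M := by
      intro v hv
      have hvf : v ∈ ws.filter (fun w => !w.isEmpty) := hN ▸ hv
      have hne : v ≠ [] := by
        have := (List.mem_filter.mp hvf).2
        simpa using this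
      constructor
      · have : v.length ≠ 0 := fun h => hne (List.length_eq_zero_iff.mp h)
        simp only [PySem.Chars.len_eq]
        omega
      · rcases hv with _ | hv'
        · exact hmax.1
        · exact hmax.2 v (by assumption)
    have h0w : (0:Int) ≤ PySem.Chars.len w := by
      simp only [PySem.Chars.len_eq]; positivity
    have h0M : (0:Int) ≤ M := le_trans h0w hmax.1
    have hall : ∀ v ∈ ws, 0 ≤ PySem.Chars.len v ∧ PySem.Chars.len v < M + 1 := by
      intro v hv
      refine ⟨by simp only [PySem.Chars.len_eq]; positivity, ?_⟩
      by_cases he : v = []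
      · subst he; simp only [PySem.Chars.len_eq]; simp; omega
      · have hvf : v ∈ ws.filter (fun w => !w.isEmpty) :=
          List.mem_filter.mpr ⟨hv, by simpa using he⟩
        rw [hN] at hvf
        have := (hlenN v hvf).2
        omega
    have hmem : ∀ x ∈ ws.map (fun v => (v, PySem.Chars.len v)),
        (fun x : List Char × Int => x.2) x ∈ PySem.List.pyRange 0 (M + 1) 1 := by
      intro x hx
      obtain ⟨v, hv, rfl⟩ := List.mem_map.mp hx
      exact (PySem.List.mem_pyRange_one).mpr ⟨(hall v hv).1, (hall v hv).2⟩
    rw [sorted_eq_flatMap_filter (fun x : List Char × Int => x.2)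
      (ws.map (fun v => (v, PySem.Chars.len v))) (PySem.List.pyRange 0 (M + 1) 1)
      (PySem.List.pairwise_lt_pyRange_one 0 (M + 1)) hmem]
    rw [PySem.List.pyRange_one_cons (by omega : (0:Int) < M + 1)]
    simp only [List.flatMap_cons, zero_add]
    have hfm : ∀ l : Int,
        (ws.map (fun v => (v, PySem.Chars.len v))).filter (fun x => decide (x.2 = l))
          = (ws.filter (fun v => decide (PySem.Chars.len v = l))).map
              (fun v => (v, PySem.Chars.len v)) := by
      intro l
      rw [List.filter_map]
      rfl
    have hb : ∀ l ∈ PySem.List.pyRange 1 (M + 1) 1,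
        ws.filter (fun v => decide (PySem.Chars.len v = l))
          = (w :: ws').filter (fun v => decide (PySem.Chars.len v = l)) := by
      intro l hl
      have h1l : 1 ≤ l := ((PySem.List.mem_pyRange_one).mp hl).1
      rw [← hN, List.filter_filter]
      apply List.filter_congr
      intro v _
      by_cases hd : v = []
      · subst hd
        simp [PySem.Chars.len_eq]
        omega
      · simp [hd]
    -- B's double loop is the bucket concatenation
    have hord : (PySem.List.pyRange 1 (M + 1) 1).foldl
        (fun acc l => (w :: ws').foldl
          (fun a v => if PySem.Chars.len v = l then a ++ [v] else a) acc) []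
        = (PySem.List.pyRange 1 (M + 1) 1).flatMap
            (fun l => (w :: ws').filter (fun v => decide (PySem.Chars.len v = l))) := by
      simp only [bucket_foldl]
      rw [PySem.List.foldl_append_eq_flatMap]
      rw [List.nil_append]
    rw [hord]
    have hwmem : w ∈ (PySem.List.pyRange 1 (M + 1) 1).flatMap
        (fun l => (w :: ws').filter (fun v => decide (PySem.Chars.len v = l))) := by
      apply List.mem_flatMap.mpr
      refine ⟨PySem.Chars.len w, ?_, ?_⟩
      · exact (PySem.List.mem_pyRange_one).mpr
          ⟨(hlenN w (List.mem_cons_self ..)).1, by have := (hlenN w (List.mem_cons_self ..)).2; omega⟩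
      · exact List.mem_filter.mpr ⟨List.mem_cons_self .., by simp⟩
    cases hord' : (PySem.List.pyRange 1 (M + 1) 1).flatMap
        (fun l => (w :: ws').filter (fun v => decide (PySem.Chars.len v = l))) with
    | nil => rw [hord'] at hwmem; exact absurd hwmem (List.not_mem_nil)
    | cons o os =>
      dsimp only
      have ho : o ≠ [] := by
        have homem : o ∈ (PySem.List.pyRange 1 (M + 1) 1).flatMap
            (fun l => (w :: ws').filter (fun v => decide (PySem.Chars.len v = l))) := by
          rw [hord']; exact List.mem_cons_self ..
        obtain ⟨l, _, hof⟩ := List.mem_flatMap.mp homem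
        have hoN : o ∈ w :: ws' := (List.mem_filter.mp hof).1
        have := (hlenN o hoN).1
        intro he
        rw [he] at this
        simp only [PySem.Chars.len_eq, List.length_nil] at this
        omega
      have hsplit : (ws.map (fun v => (v, PySem.Chars.len v))).filter (fun x => decide (x.2 = 0))
            ++ (PySem.List.pyRange 1 (M + 1) 1).flatMap
                (fun l => (ws.map (fun v => (v, PySem.Chars.len v))).filter (fun x => decide (x.2 = l)))
          = (ws.filter (fun v => decide (PySem.Chars.len v = 0))).map (fun v => (v, PySem.Chars.len v))
            ++ ((o :: os).map (fun v => (v, PySem.Chars.len v))) := by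
        rw [hfm 0]
        congr 1
        calc (PySem.List.pyRange 1 (M + 1) 1).flatMap
              (fun l => (ws.map (fun v => (v, PySem.Chars.len v))).filter (fun x => decide (x.2 = l)))
            = (PySem.List.pyRange 1 (M + 1) 1).flatMap
              (fun l => ((w :: ws').filter (fun v => decide (PySem.Chars.len v = l))).map
                (fun v => (v, PySem.Chars.len v))) :=
              flatMap_congr' (fun l hl => by rw [hfm l, hb l hl])
          _ = ((PySem.List.pyRange 1 (M + 1) 1).flatMap
                (fun l => (w :: ws').filter (fun v => decide (PySem.Chars.len v = l)))).map
                (fun v => (v, PySem.Chars.len v)) :=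
              by rw [List.map_flatMap]
          _ = (o :: os).map (fun v => (v, PySem.Chars.len v)) := by rw [hord']
      rw [hsplit]
      rw [List.foldl_append]
      have hE : ((ws.filter (fun v => decide (PySem.Chars.len v = 0))).map
            (fun v => (v, PySem.Chars.len v))).foldl
          (fun result sl => if result = [] then result ++ pyTitle sl.1
            else result ++ ([' '] ++ sl.1)) [] = ([] : List Char) := by
        apply foldl_out_empties
        intro e he
        obtain ⟨v, hv, rfl⟩ := List.mem_map.mp he
        have hv2 := (List.mem_filter.mp hv).2
        simp only [decide_eq_true_eq, PySem.Chars.len_eq] at hv2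
        have hv0 : v.length = 0 := by exact_mod_cast hv2
        show v = []
        exact List.length_eq_zero_iff.mp hv0
      rw [hE]
      rw [List.foldl_map]
      rw [List.foldl_cons]
      rw [if_pos rfl, List.nil_append]
      rw [foldl_out_sep os (pyTitle o) (pyTitle_ne_nil o ho)]
      rw [join_space_cons]

theorem core_eq (t : List Char) : arrangeWordsCore t = arrangeWordsAltCore t := by
  unfold arrangeWordsCore arrangeWordsAltCore
  cases hsplit : PySem.Chars.splitOn t [' '] with
  | nil => rfl
  | cons h r => exact main_eq (PySem.Chars.lower h :: r)

-- ===== VERDICT (by name: the statement is the Claim_ definition above) =====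
theorem arrangeWords_spec : Claim_equal_arrangeWords := by
  intro text _
  unfold Spec_arrangeWords arrangeWords arrangeWords_alt
  rw [core_eq]
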